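-- pv_equiv track=rewrite | github.com/sunsikham/CED_kv | src/cedkv_mvp/kv_inject.py | _truncate_spans_to_prefix
-- ===== SOURCE A (Python) =====
-- def _truncate_spans_to_prefix(selected_spans: list[tuple[int, int]], prefix_len: int) -> list[tuple[int, int]]:
--     if prefix_len <= 0:
--         return []
--     total = 0
--     result: list[tuple[int, int]] = []
--     for start, end in selected_spans:
--         if end <= start:
--             continue
--         span_size = end - start
--         remain = prefix_len - total
--         if remain <= 0:
--             break
--         if span_size <= remain:
--             result.append((start, end))
--             total += span_size
--         else:
--             result.append((start, start + remain))
--             total += remain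
--             break
--     return result
-- ===== SOURCE B (Python) =====
-- from itertools import accumulate
-- from bisect import bisect_left
--
-- def _truncate_spans_to_prefix(selected_spans: list[tuple[int, int]], prefix_len: int) -> list[tuple[int, int]]:
--     if prefix_len <= 0:
--         return []
--     valid = [(s, e) for s, e in selected_spans if s < e]
--     cums = list(accumulate(e - s for s, e in valid))
--     i = bisect_left(cums, prefix_len)
--     if i == len(valid):
--         return valid
--     before = cums[i - 1] if i > 0 else 0
--     s = valid[i][0]
--     return valid[:i] + [(s, s + (prefix_len - before))]
-- ===== Notes on version B (the rewrite author's own statement) =====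
-- stated objective: alternative
-- what changed: Replaces the single stateful loop with running total and break by filter-out-empty-spans, an itertools.accumulate prefix-sum table, a bisect_left search for the boundary index, and slice-plus-truncated-boundary assembly.
import Mathlib
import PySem

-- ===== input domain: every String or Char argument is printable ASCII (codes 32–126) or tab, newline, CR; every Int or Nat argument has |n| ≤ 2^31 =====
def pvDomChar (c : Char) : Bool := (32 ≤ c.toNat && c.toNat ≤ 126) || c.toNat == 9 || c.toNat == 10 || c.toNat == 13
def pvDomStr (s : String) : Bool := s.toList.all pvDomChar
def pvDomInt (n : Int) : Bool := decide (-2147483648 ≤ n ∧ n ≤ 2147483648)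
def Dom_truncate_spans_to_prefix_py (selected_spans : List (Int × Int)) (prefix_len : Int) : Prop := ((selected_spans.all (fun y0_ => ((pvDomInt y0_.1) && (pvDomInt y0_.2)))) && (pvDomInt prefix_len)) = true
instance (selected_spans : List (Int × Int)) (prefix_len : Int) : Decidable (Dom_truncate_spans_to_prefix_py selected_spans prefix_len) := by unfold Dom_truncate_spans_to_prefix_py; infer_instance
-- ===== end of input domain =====

-- B changes the decomposition (filter + prefix-sum table + bisect instead of one stateful loop with break); objective: alternative, same cost.

-- ===== PORT A =====
-- the for-loop of A, state = (total, result); returning `result` models `break`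
def pvLoopA (spans : List (Int × Int)) (prefix_len total : Int)
    (result : List (Int × Int)) : List (Int × Int) :=
  match spans with
  | [] => result
  | (s, e) :: rest =>
    if e ≤ s then pvLoopA rest prefix_len total result
    else
      let span_size := e - s
      let remain := prefix_len - total
      if remain ≤ 0 then result
      else if span_size ≤ remain then
        pvLoopA rest prefix_len (total + span_size) (result ++ [(s, e)])
      else result ++ [(s, s + remain)]

def truncate_spans_to_prefix_py (selected_spans : List (Int × Int)) (prefix_len : Int) : List (Int × Int) :=
  if prefix_len ≤ 0 then [] else pvLoopA selected_spans prefix_len 0 []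

-- ===== PORT B =====
-- port of itertools.accumulate (running sums)
def pvAccumulate (acc : Int) : List Int → List Int
  | [] => []
  | x :: xs => (acc + x) :: pvAccumulate (acc + x) xs

def truncate_spans_to_prefix_py_alt (selected_spans : List (Int × Int)) (prefix_len : Int) : List (Int × Int) :=
  if prefix_len ≤ 0 then []
  else
    let valid := selected_spans.filter (fun x => decide (x.1 < x.2))
    let cums := pvAccumulate 0 (valid.map (fun x => x.2 - x.1))
    -- bisect_left on the sorted prefix sums = insertion point = number of entries < prefix_len
    let i := (cums.takeWhile (fun c => decide (c < prefix_len))).length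
    if i = valid.length then valid
    else
      let before := if 0 < i then cums.getD (i - 1) 0 else 0
      let s := (valid.getD i (0, 0)).1
      valid.take i ++ [(s, s + (prefix_len - before))]

-- ===== PRECONDITION & SPEC =====
def Spec_truncate_spans_to_prefix_py (selected_spans : List (Int × Int)) (prefix_len : Int) (out : List (Int × Int)) : Prop := out = truncate_spans_to_prefix_py_alt selected_spans prefix_len
instance (selected_spans : List (Int × Int)) (prefix_len : Int) (out : List (Int × Int)) : Decidable (Spec_truncate_spans_to_prefix_py selected_spans prefix_len out) := by unfold Spec_truncate_spans_to_prefix_py; infer_instance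

-- ===== CLAIM (what is proved, stated in full; the proofs are below) =====
def Claim_equal_truncate_spans_to_prefix_py : Prop := ∀ (selected_spans : List (Int × Int)) (prefix_len : Int), Dom_truncate_spans_to_prefix_py selected_spans prefix_len → Spec_truncate_spans_to_prefix_py selected_spans prefix_len (truncate_spans_to_prefix_py selected_spans prefix_len)

-- ===== LEMMAS AND PROOFS =====

-- common reference function both ports are reduced to
def pvSpec : List (Int × Int) → Int → List (Int × Int)
  | [], _ => []
  | (s, e) :: rest, p =>
    if p ≤ 0 then []
    else if e ≤ s then pvSpec rest p
    else if p ≤ e - s then [(s, s + p)]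
    else (s, e) :: pvSpec rest (p - (e - s))

lemma pvSpec_nonpos (spans : List (Int × Int)) (p : Int) (h : p ≤ 0) : pvSpec spans p = [] := by
  cases spans with
  | nil => rfl
  | cons x rest => cases x; simp [pvSpec, h]

lemma pvLoopA_eq (spans : List (Int × Int)) :
    ∀ (p total : Int) (result : List (Int × Int)),
      pvLoopA spans p total result = result ++ pvSpec spans (p - total) := by
  induction spans with
  | nil => intro p total result; simp [pvLoopA, pvSpec]
  | cons x rest ih =>
    rcases x with ⟨s, e⟩
    intro p total result
    by_cases he : e ≤ s
    · simp only [pvLoopA, he, if_true, ih]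
      have hsk : pvSpec ((s, e) :: rest) (p - total) = pvSpec rest (p - total) := by
        by_cases hp : p - total ≤ 0
        · rw [pvSpec_nonpos _ _ hp, pvSpec_nonpos _ _ hp]
        · simp [pvSpec, hp, he]
      rw [hsk]
    · by_cases hr : p - total ≤ 0
      · simp [pvLoopA, pvSpec, he, hr]
      · by_cases hs : e - s ≤ p - total
        · have h2 : ¬ (p - total ≤ e - s) ∨ p - total = e - s := by omega
          simp only [pvLoopA, pvSpec, he, hr, hs, if_true, if_false, ih]
          rcases h2 with h2 | h2
          · simp only [h2, if_false]
            have : p - (total + (e - s)) = p - total - (e - s) := by ring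
            rw [this, List.append_assoc]; rfl
          · have h3 : p - total ≤ e - s := by omega
            have h4 : p - (total + (e - s)) ≤ 0 := by omega
            rw [pvSpec_nonpos rest _ h4]
            simp only [h3, if_true]
            have : s + (p - total) = e := by omega
            simp [this]
        · simp only [pvLoopA, pvSpec, he, hr, hs, if_false]
          have h3 : p - total ≤ e - s := by omega
          simp [h3]

lemma pvA_eq_spec (spans : List (Int × Int)) (p : Int) :
    truncate_spans_to_prefix_py spans p = pvSpec spans p := by
  unfold truncate_spans_to_prefix_py
  by_cases hp : p ≤ 0
  · rw [pvSpec_nonpos spans p hp]; simp [hp]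
  · simp only [hp, if_false]
    rw [pvLoopA_eq]; simp

lemma pvAccumulate_shift (xs : List Int) :
    ∀ a : Int, pvAccumulate a xs = (pvAccumulate 0 xs).map (fun c => a + c) := by
  induction xs with
  | nil => intro a; rfl
  | cons x xs ih =>
    intro a
    simp only [pvAccumulate, List.map_cons]
    rw [ih (a + x), ih (0 + x), List.map_map]
    congr 1
    · ring
    · have hf : (fun c => a + x + c) = ((fun c => a + c) ∘ fun c : Int => 0 + x + c) := by
        funext c
        simp only [Function.comp_apply]
        ring
      rw [hf]

lemma pvAccumulate_length (xs : List Int) : ∀ a : Int, (pvAccumulate a xs).length = xs.length := by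
  induction xs with
  | nil => intro a; rfl
  | cons x xs ih => intro a; simp [pvAccumulate, ih]

lemma pvTakeWhile_shift (xs : List Int) (a p : Int) :
    ((pvAccumulate a xs).takeWhile (fun c => decide (c < p))).length
      = ((pvAccumulate 0 xs).takeWhile (fun c => decide (c < p - a))).length := by
  rw [pvAccumulate_shift, List.takeWhile_map, List.length_map]
  have hf : ((fun c => decide (c < p)) ∘ fun c => a + c) = (fun c : Int => decide (c < p - a)) := by
    funext c
    simp only [Function.comp_apply]
    exact decide_eq_decide.mpr (by omega)
  rw [hf]

lemma pvGetD_shift (c0 : Int) (l : List Int) (j : Nat) (hj : j ≤ l.length) :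
    (c0 :: l.map (fun c => c0 + c)).getD j 0
      = c0 + (if 0 < j then l.getD (j - 1) 0 else 0) := by
  cases j with
  | zero => simp
  | succ k =>
    have hk : k < l.length := by omega
    simp [List.getD, List.getElem?_map, List.getElem?_eq_getElem hk]

lemma pvAlt_eq_spec (spans : List (Int × Int)) :
    ∀ p : Int, truncate_spans_to_prefix_py_alt spans p = pvSpec spans p := by
  induction spans with
  | nil =>
    intro p
    unfold truncate_spans_to_prefix_py_alt
    by_cases hp : p ≤ 0 <;> simp [hp, pvSpec, pvAccumulate]
  | cons x rest ih =>
    rcases x with ⟨s, e⟩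
    intro p
    by_cases hp : p ≤ 0
    · unfold truncate_spans_to_prefix_py_alt
      rw [pvSpec_nonpos _ _ hp]; simp [hp]
    · by_cases he : e ≤ s
      · -- head span is empty: filtered out, alt on cons reduces to alt on rest
        have hfe : ¬ (s < e) := by omega
        have : truncate_spans_to_prefix_py_alt ((s, e) :: rest) p
            = truncate_spans_to_prefix_py_alt rest p := by
          unfold truncate_spans_to_prefix_py_alt
          simp [hfe]
        rw [this, ih p]
        simp [pvSpec, hp, he]
      · have hlt : s < e := by omega
        set valid' := rest.filter (fun x => decide (x.1 < x.2)) with hvalid'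
        set sizes' := valid'.map (fun x : Int × Int => x.2 - x.1) with hsizes'
        have hcons : ((s, e) :: rest).filter (fun x => decide (x.1 < x.2)) = (s, e) :: valid' := by
          simp [hvalid', hlt]
        have hcums : pvAccumulate 0 (((s, e) :: valid').map (fun x : Int × Int => x.2 - x.1))
            = (e - s) :: pvAccumulate (e - s) sizes' := by
          simp [pvAccumulate, hsizes']
        by_cases hbig : p ≤ e - s
        · -- truncation happens at the head span
          have hnlt : ¬ ((e - s : Int) < p) := by omega
          unfold truncate_spans_to_prefix_py_alt
          simp only [hp, if_false, hcons, hcums]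
          simp [hnlt, pvSpec, hp, he, hbig]
        · -- head span fits completely
          have hhd : (e - s : Int) < p := by omega
          have hspec : pvSpec ((s, e) :: rest) p = (s, e) :: pvSpec rest (p - (e - s)) := by
            simp [pvSpec, hp, he, hbig]
          rw [hspec, ← ih (p - (e - s))]
          have hp' : ¬ (p - (e - s) ≤ 0) := by omega
          unfold truncate_spans_to_prefix_py_alt
          simp only [hp, hp', if_false, hcons, hcums, hvalid'.symm]
          -- outer index = 1 + inner index
          rw [List.takeWhile_cons]
          have hdec : (decide ((e - s : Int) < p)) = true := by simp [hhd]
          simp only [hdec, if_true, List.length_cons]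
          rw [pvTakeWhile_shift sizes' (e - s) p]
          set i' := ((pvAccumulate 0 sizes').takeWhile (fun c => decide (c < p - (e - s)))).length with hi'
          have hi'le : i' ≤ valid'.length := by
            rw [hi', hsizes']
            calc ((pvAccumulate 0 (valid'.map (fun x : Int × Int => x.2 - x.1))).takeWhile
                    (fun c => decide (c < p - (e - s)))).length
                ≤ (pvAccumulate 0 (valid'.map (fun x : Int × Int => x.2 - x.1))).length :=
                  (List.takeWhile_sublist _).length_le
              _ = valid'.length := by rw [pvAccumulate_length]; simp
          by_cases hend : i' = valid'.length
          · simp [hend]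
          · have hne : ¬ (i' + 1 = valid'.length + 1) := by omega
            simp only [hne, if_false, hend, if_false]
            have hlen0 : i' ≤ (pvAccumulate 0 sizes').length := by
              rw [pvAccumulate_length]; rw [hsizes']; simp; omega
            rw [pvAccumulate_shift sizes' (e - s)]
            simp only [Nat.add_sub_cancel, List.getD_cons_succ, List.take_succ_cons,
              Nat.zero_lt_succ, if_true]
            rw [pvGetD_shift (e - s) (pvAccumulate 0 sizes') i' hlen0]
            have harith : ∀ b : Int, p - ((e - s) + b) = p - (e - s) - b := by intro b; ring
            rw [harith]
            rfl

-- ===== VERDICT (by name: the statement is the Claim_ definition above) =====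
theorem truncate_spans_to_prefix_py_spec : Claim_equal_truncate_spans_to_prefix_py := by
  intro spans p _
  unfold Spec_truncate_spans_to_prefix_py
  rw [pvA_eq_spec, pvAlt_eq_spec]
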